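-- pv_equiv track=rewrite | github.com/zhouhang/financial-ai | finance-agents/data-agent/utils/file_intake.py | _normalize_file_columns
-- ===== SOURCE A (Python) =====
-- from typing import Any
--
-- def _normalize_column_name(col_name: str, config: dict[str, Any]) -> str:
--     normalized = str(col_name).strip()
--     if config.get("ignore_whitespace", True):
--         normalized = normalized.replace(" ", "").replace("\t", "")
--     if not config.get("case_sensitive", False):
--         normalized = normalized.lower()
--     return normalized
--
-- def _build_alias_mapping(table_schema: dict[str, Any], config: dict[str, Any]) -> dict[str, str]:
--     alias_map: dict[str, str] = {}
--     for original_col, aliases in (table_schema.get("column_aliases") or {}).items():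
--         normalized_original = _normalize_column_name(str(original_col), config)
--         for alias in aliases or []:
--             alias_map[_normalize_column_name(str(alias), config)] = normalized_original
--     return alias_map
--
-- def _normalize_file_columns(
--     file_columns: list[str],
--     table_schema: dict[str, Any],
--     config: dict[str, Any],
-- ) -> set[str]:
--     alias_map = _build_alias_mapping(table_schema, config)
--     normalized_set: set[str] = set()
--     for col in file_columns:
--         normalized_col = _normalize_column_name(str(col), config)
--         normalized_set.add(alias_map.get(normalized_col, normalized_col))
--     return normalized_set
-- ===== SOURCE B (Python) =====
-- def _normalize_column_name(col_name, config):
--     normalized = str(col_name).strip()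
--     if config.get("ignore_whitespace", True):
--         normalized = normalized.replace(" ", "").replace("\t", "")
--     if not config.get("case_sensitive", False):
--         normalized = normalized.lower()
--     return normalized
--
-- def _normalize_file_columns(file_columns, table_schema, config):
--     items = (table_schema.get("column_aliases") or {}).items()
--
--     def resolve(col):
--         nc = _normalize_column_name(col, config)
--         for original, aliases in items:
--             if any(_normalize_column_name(a, config) == nc for a in aliases or []):
--                 return _normalize_column_name(original, config)
--         return nc
--
--     return {resolve(col) for col in file_columns}
-- ===== Notes on version B (the rewrite author's own statement) =====
-- stated objective: alternative
-- what changed: B drops A's prebuilt alias dictionary and resolves each column by a direct first-match scan of the schema's alias pairs; Pre_ excludes schemas where the same normalized alias is claimed by originals with different normalized names, on which A's dict-overwrite (last-wins) order is accidental.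
-- outside the precondition, e.g. on _normalize_file_columns(['x'], {'column_aliases': {'a': ['x'], 'b': ['x']}}, {}): A returns {'b'}, B returns {'a'}
import Mathlib
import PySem

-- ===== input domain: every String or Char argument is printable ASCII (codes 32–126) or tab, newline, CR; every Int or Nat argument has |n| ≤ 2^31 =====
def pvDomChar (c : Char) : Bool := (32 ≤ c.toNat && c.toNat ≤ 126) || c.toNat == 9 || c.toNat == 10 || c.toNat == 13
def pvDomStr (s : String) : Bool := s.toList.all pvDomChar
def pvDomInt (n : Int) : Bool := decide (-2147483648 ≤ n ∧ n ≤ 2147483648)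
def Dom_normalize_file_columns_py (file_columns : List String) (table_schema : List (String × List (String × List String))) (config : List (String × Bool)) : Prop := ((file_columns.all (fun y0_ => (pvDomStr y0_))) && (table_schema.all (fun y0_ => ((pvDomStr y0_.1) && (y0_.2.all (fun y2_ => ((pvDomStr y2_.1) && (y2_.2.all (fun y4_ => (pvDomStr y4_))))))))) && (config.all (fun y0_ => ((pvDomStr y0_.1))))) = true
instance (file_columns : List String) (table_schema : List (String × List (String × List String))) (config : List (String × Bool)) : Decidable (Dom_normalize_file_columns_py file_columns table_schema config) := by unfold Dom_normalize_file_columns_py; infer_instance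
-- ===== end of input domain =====

-- ===== PORT A =====
-- B replaces A's prebuilt alias dictionary by a per-column first-match scan of the schema pairs (alternative decomposition).

-- helper shared by both Pythons: _normalize_column_name
def pyNormCol (col : String) (config : List (String × Bool)) : String :=
  let n := PySem.Str.strip col
  let n := if (PySem.Dict.mk config).getD "ignore_whitespace" true
           then PySem.Str.replace (PySem.Str.replace n " " "") "\t" ""
           else n
  if (PySem.Dict.mk config).getD "case_sensitive" false then n else PySem.Str.lower n

-- _build_alias_mapping
def pyBuildAliasMap (table_schema : List (String × List (String × List String))) (config : List (String × Bool)) : PySem.Dict String String :=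
  ((PySem.Dict.mk table_schema).getD "column_aliases" []).foldl
    (fun d p => p.2.foldl (fun d a => d.insert (pyNormCol a config) (pyNormCol p.1 config)) d)
    PySem.Dict.empty

def normalize_file_columns_py (file_columns : List String) (table_schema : List (String × List (String × List String))) (config : List (String × Bool)) : List String :=
  let alias_map := pyBuildAliasMap table_schema config
  file_columns.foldl
    (fun s col =>
      let nc := pyNormCol col config
      PySem.Set.add s (alias_map.getD nc nc))
    PySem.Set.empty

-- ===== PORT B =====
-- resolve: first schema pair whose alias list contains the normalized column
def pyResolve (items : List (String × List String)) (config : List (String × Bool)) (col : String) : String :=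
  let nc := pyNormCol col config
  match items.find? (fun p => p.2.any (fun a => pyNormCol a config == nc)) with
  | some p => pyNormCol p.1 config
  | none => nc

def normalize_file_columns_py_alt (file_columns : List String) (table_schema : List (String × List (String × List String))) (config : List (String × Bool)) : List String :=
  let items := (PySem.Dict.mk table_schema).getD "column_aliases" []
  PySem.List.dedup (file_columns.map (pyResolve items config))

-- ===== PRECONDITION & SPEC =====
-- Pre_ excludes schemas in which the same normalized alias is claimed by two originals with
-- different normalized names: there A's last-wins dict-overwrite order is accidental and either
-- original is a defensible resolution.
def Pre_normalize_file_columns_py (file_columns : List String) (table_schema : List (String × List (String × List String))) (config : List (String × Bool)) : Prop :=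
  ∀ p ∈ (PySem.Dict.mk table_schema).getD "column_aliases" [],
    ∀ q ∈ (PySem.Dict.mk table_schema).getD "column_aliases" [],
      ∀ a ∈ p.2, ∀ b ∈ q.2,
        pyNormCol a config = pyNormCol b config → pyNormCol p.1 config = pyNormCol q.1 config
instance (file_columns : List String) (table_schema : List (String × List (String × List String))) (config : List (String × Bool)) : Decidable (Pre_normalize_file_columns_py file_columns table_schema config) := by unfold Pre_normalize_file_columns_py; infer_instance

def pvWitness_normalize_file_columns_py : List String × (List (String × List (String × List String))) × (List (String × Bool)) :=
  (["Price ", "qty"], [("column_aliases", [("amount", ["price"])])], [])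

def Spec_normalize_file_columns_py (file_columns : List String) (table_schema : List (String × List (String × List String))) (config : List (String × Bool)) (out : List String) : Prop := out = normalize_file_columns_py_alt file_columns table_schema config
instance (file_columns : List String) (table_schema : List (String × List (String × List String))) (config : List (String × Bool)) (out : List String) : Decidable (Spec_normalize_file_columns_py file_columns table_schema config out) := by unfold Spec_normalize_file_columns_py; infer_instance

-- ===== CLAIM (what is proved, stated in full; the proofs are below) =====
def Claim_equal_normalize_file_columns_py : Prop := ∀ (file_columns : List String) (table_schema : List (String × List (String × List String))) (config : List (String × Bool)), Dom_normalize_file_columns_py file_columns table_schema config → Pre_normalize_file_columns_py file_columns table_schema config → Spec_normalize_file_columns_py file_columns table_schema config (normalize_file_columns_py file_columns table_schema config)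

-- ===== LEMMAS AND PROOFS =====

theorem inner_getD (config : List (String × Bool)) (v k : String) :
    ∀ (as : List String) (d : PySem.Dict String String),
      (as.foldl (fun d a => d.insert (pyNormCol a config) v) d).getD k k
        = if as.any (fun a => pyNormCol a config == k) then v else d.getD k k := by
  intro as
  induction as with
  | nil => intro d; simp [List.foldl]
  | cons a rest ih =>
      intro d
      simp only [List.foldl_cons, List.any_cons, ih, PySem.Dict.getD_insert]
      by_cases h : k = pyNormCol a config
      · simp [h]
      · simp only [if_neg h]
        have h2 : (pyNormCol a config == k) = false := by exact beq_eq_false_iff_ne.mpr (fun e => h e.symm)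
        simp [h2]

theorem outer_getD (config : List (String × Bool)) (k : String) :
    ∀ (pairs : List (String × List String)) (d : PySem.Dict String String),
      (pairs.foldl (fun d p => p.2.foldl (fun d a => d.insert (pyNormCol a config) (pyNormCol p.1 config)) d) d).getD k k
        = pairs.foldl (fun acc p => if p.2.any (fun a => pyNormCol a config == k) then pyNormCol p.1 config else acc) (d.getD k k) := by
  intro pairs
  induction pairs with
  | nil => intro d; simp [List.foldl]
  | cons p rest ih =>
      intro d
      simp only [List.foldl_cons, ih, inner_getD]

-- a fold in which every matching pair yields the accumulator's value is constant
theorem foldl_const (config : List (String × Bool)) (k v : String) :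
    ∀ (pairs : List (String × List String)),
      (∀ q ∈ pairs, q.2.any (fun a => pyNormCol a config == k) = true → pyNormCol q.1 config = v) →
      pairs.foldl (fun acc p => if p.2.any (fun a => pyNormCol a config == k) then pyNormCol p.1 config else acc) v = v := by
  intro pairs
  induction pairs with
  | nil => intro _; rfl
  | cons p rest ih =>
      intro h
      simp only [List.foldl_cons]
      by_cases hp : p.2.any (fun a => pyNormCol a config == k) = true
      · rw [if_pos hp, h p (List.mem_cons_self ..) hp]
        exact ih (fun q hq => h q (List.mem_cons_of_mem _ hq))
      · rw [if_neg hp]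
        exact ih (fun q hq => h q (List.mem_cons_of_mem _ hq))

-- under the consistency precondition, the last-wins fold equals the first-match scan
theorem lastwins_eq_firstmatch (config : List (String × Bool)) (k : String) :
    ∀ (pairs : List (String × List String)),
      (∀ p ∈ pairs, ∀ q ∈ pairs, ∀ a ∈ p.2, ∀ b ∈ q.2,
          pyNormCol a config = pyNormCol b config → pyNormCol p.1 config = pyNormCol q.1 config) →
      pairs.foldl (fun acc p => if p.2.any (fun a => pyNormCol a config == k) then pyNormCol p.1 config else acc) k
        = (match pairs.find? (fun p => p.2.any (fun a => pyNormCol a config == k)) with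
           | some p => pyNormCol p.1 config
           | none => k) := by
  intro pairs
  induction pairs with
  | nil => intro _; rfl
  | cons p rest ih =>
      intro h
      simp only [List.foldl_cons]
      by_cases hp : p.2.any (fun a => pyNormCol a config == k) = true
      · rw [if_pos hp, List.find?_cons_of_pos (p := fun (q : String × List String) => q.2.any (fun a => pyNormCol a config == k)) hp]
        obtain ⟨a, ha, hak⟩ := List.any_eq_true.mp hp
        apply foldl_const
        intro q hq hqm
        obtain ⟨b, hb, hbk⟩ := List.any_eq_true.mp hqm
        exact h q (List.mem_cons_of_mem _ hq) p (List.mem_cons_self ..) b hb a ha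
          (by rw [eq_of_beq hbk, eq_of_beq hak])
      · rw [if_neg hp, List.find?_cons_of_neg (p := fun (q : String × List String) => q.2.any (fun a => pyNormCol a config == k)) hp]
        exact ih (fun x hx y hy => h x (List.mem_cons_of_mem _ hx) y (List.mem_cons_of_mem _ hy))

theorem resolve_eq (table_schema : List (String × List (String × List String))) (config : List (String × Bool)) (col : String)
    (hpre : ∀ p ∈ (PySem.Dict.mk table_schema).getD "column_aliases" [],
        ∀ q ∈ (PySem.Dict.mk table_schema).getD "column_aliases" [],
          ∀ a ∈ p.2, ∀ b ∈ q.2,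
            pyNormCol a config = pyNormCol b config → pyNormCol p.1 config = pyNormCol q.1 config) :
    pyResolve ((PySem.Dict.mk table_schema).getD "column_aliases" []) config col
      = (pyBuildAliasMap table_schema config).getD (pyNormCol col config) (pyNormCol col config) := by
  unfold pyBuildAliasMap
  rw [outer_getD]
  rw [PySem.Dict.getD_empty]
  rw [lastwins_eq_firstmatch _ _ _ hpre]
  rfl

-- ===== VERDICT (by name: the statement is the Claim_ definition above) =====
theorem normalize_file_columns_py_spec : Claim_equal_normalize_file_columns_py := by
  intro file_columns table_schema config _ hpre
  unfold Spec_normalize_file_columns_py normalize_file_columns_py normalize_file_columns_py_alt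
  rw [PySem.List.dedup_eq_ofList, PySem.Set.ofList_eq_foldl, List.foldl_map]
  simp only [resolve_eq table_schema config _ hpre]
  rfl
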